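-- pv_equiv track=rewrite | github.com/jzabielski/Matury-rozszerzone | matura2018PR/zadanie4matura2018PR.py | OdstepMniej10
-- ===== SOURCE A (Python) =====
-- def OdlLiter2(a, b):
--     i = abs(ord(a) - ord(b))
--     return i
--
-- def OdstepMniej10(s):
--     mniej10 = True
--     dl = len(s)
--     for z in s:
--         for i in range(dl):
--             if OdlLiter2(z, s[i]) > 10:
--                 mniej10 = False
--                 break
--     return mniej10
-- ===== SOURCE B (Python) =====
-- def OdstepMniej10(s):
--     if not s:
--         return True
--     lo = hi = ord(s[0])
--     for c in s[1:]:
--         o = ord(c)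
--         if o < lo:
--             lo = o
--         if o > hi:
--             hi = o
--     return hi - lo <= 10
-- ===== Notes on version B (the rewrite author's own statement) =====
-- stated objective: faster
-- what changed: Replaces the nested all-pairs scan (every pair of characters checked for ord-distance > 10) by a single pass computing the min and max character code and testing max-min <= 10.
import Mathlib
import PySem

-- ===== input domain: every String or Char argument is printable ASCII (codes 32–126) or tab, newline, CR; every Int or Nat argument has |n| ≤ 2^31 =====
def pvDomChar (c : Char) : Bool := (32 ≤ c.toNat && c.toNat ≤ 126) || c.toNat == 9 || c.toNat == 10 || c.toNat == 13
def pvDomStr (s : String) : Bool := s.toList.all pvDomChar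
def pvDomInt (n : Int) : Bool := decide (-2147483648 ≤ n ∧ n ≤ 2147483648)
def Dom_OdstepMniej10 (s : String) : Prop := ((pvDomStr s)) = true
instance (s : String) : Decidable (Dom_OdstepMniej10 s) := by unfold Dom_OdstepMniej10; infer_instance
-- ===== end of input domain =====

-- B replaces A's nested all-pairs ord-distance scan by a single min/max pass (objective: faster, O(n^2) -> O(n)).

-- ===== PORT A =====
def OdlLiter2 (a b : Char) : Int := |(a.toNat : Int) - (b.toNat : Int)|

-- inner 'for i in range(dl): if OdlLiter2(z, s[i]) > 10: mniej10 = False; break'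
def pvInnerA (z : Char) (cs : List Char) (m : Bool) : Bool :=
  match cs with
  | [] => m
  | c :: rest => if OdlLiter2 z c > 10 then false else pvInnerA z rest m

def OdstepMniej10 (s : String) : Bool :=
  s.toList.foldl (fun m z => pvInnerA z s.toList m) true

-- ===== PORT B =====
def OdstepMniej10_alt (s : String) : Bool :=
  match s.toList with
  | [] => true
  | c :: rest =>
    let p := rest.foldl
      (fun (p : Int × Int) c =>
        (if (c.toNat : Int) < p.1 then (c.toNat : Int) else p.1,
         if (c.toNat : Int) > p.2 then (c.toNat : Int) else p.2))
      ((c.toNat : Int), (c.toNat : Int))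
    decide (p.2 - p.1 ≤ 10)

-- ===== PRECONDITION & SPEC =====
def Spec_OdstepMniej10 (s : String) (out : Bool) : Prop := out = OdstepMniej10_alt s
instance (s : String) (out : Bool) : Decidable (Spec_OdstepMniej10 s out) := by unfold Spec_OdstepMniej10; infer_instance

-- ===== CLAIM (what is proved, stated in full; the proofs are below) =====
def Claim_equal_OdstepMniej10 : Prop := ∀ (s : String), Dom_OdstepMniej10 s → Spec_OdstepMniej10 s (OdstepMniej10 s)

-- ===== LEMMAS AND PROOFS =====

-- inner loop: returns m unless some char of cs is more than 10 away from z
theorem pvInnerA_eq (z : Char) (cs : List Char) (m : Bool) :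
    pvInnerA z cs m = (m && cs.all (fun c => decide (OdlLiter2 z c ≤ 10))) := by
  induction cs with
  | nil => simp [pvInnerA]
  | cons c rest ih =>
    simp only [pvInnerA, List.all_cons]
    by_cases h : OdlLiter2 z c > 10
    · simp [h, show ¬ OdlLiter2 z c ≤ 10 by omega]
    · simp [h, show OdlLiter2 z c ≤ 10 by omega, ih]

theorem foldl_and (l : List Char) (f : Char → Bool) (b : Bool) :
    l.foldl (fun m z => m && f z) b = (b && l.all f) := by
  induction l generalizing b with
  | nil => simp
  | cons c rest ih => simp [List.foldl_cons, ih, Bool.and_assoc]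

theorem portA_eq_pairs (s : String) :
    OdstepMniej10 s =
      s.toList.all (fun z => s.toList.all (fun c => decide (OdlLiter2 z c ≤ 10))) := by
  unfold OdstepMniej10
  simp only [pvInnerA_eq]
  rw [foldl_and]; simp

-- characterisation of B's min/max fold
theorem foldl_minmax (rest : List Char) (a b : Int) :
    let p := rest.foldl
      (fun (p : Int × Int) c =>
        (if (c.toNat : Int) < p.1 then (c.toNat : Int) else p.1,
         if (c.toNat : Int) > p.2 then (c.toNat : Int) else p.2)) (a, b)
    (p.1 = a ∨ ∃ c ∈ rest, p.1 = (c.toNat : Int)) ∧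
    (p.2 = b ∨ ∃ c ∈ rest, p.2 = (c.toNat : Int)) ∧
    p.1 ≤ a ∧ b ≤ p.2 ∧ ∀ c ∈ rest, p.1 ≤ (c.toNat : Int) ∧ (c.toNat : Int) ≤ p.2 := by
  induction rest generalizing a b with
  | nil => simp
  | cons c rest ih =>
    simp only [List.foldl_cons]
    by_cases h1 : (c.toNat : Int) < a <;> by_cases h2 : (c.toNat : Int) > b
    · simp only [if_pos h1, if_pos h2]
      obtain ⟨q1, q2, q3, q4, q5⟩ := ih ((c.toNat : Int)) ((c.toNat : Int))
      refine ⟨?_, ?_, by omega, by omega, fun d hd => ?_⟩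
      · rcases q1 with h | ⟨d, hd, he⟩
        · first
          | exact Or.inl h
          | exact Or.inr ⟨c, by simp, h⟩
        · exact Or.inr ⟨d, by simp [hd], he⟩
      · rcases q2 with h | ⟨d, hd, he⟩
        · first
          | exact Or.inl h
          | exact Or.inr ⟨c, by simp, h⟩
        · exact Or.inr ⟨d, by simp [hd], he⟩
      · rcases List.mem_cons.mp hd with h | h
        · subst h; exact ⟨by omega, by omega⟩
        · exact q5 d h
    · simp only [if_pos h1, if_neg h2]
      obtain ⟨q1, q2, q3, q4, q5⟩ := ih ((c.toNat : Int)) b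
      refine ⟨?_, ?_, by omega, by omega, fun d hd => ?_⟩
      · rcases q1 with h | ⟨d, hd, he⟩
        · first
          | exact Or.inl h
          | exact Or.inr ⟨c, by simp, h⟩
        · exact Or.inr ⟨d, by simp [hd], he⟩
      · rcases q2 with h | ⟨d, hd, he⟩
        · exact Or.inl h
        · exact Or.inr ⟨d, by simp [hd], he⟩
      · rcases List.mem_cons.mp hd with h | h
        · subst h; exact ⟨by omega, by omega⟩
        · exact q5 d h
    · simp only [if_neg h1, if_pos h2]
      obtain ⟨q1, q2, q3, q4, q5⟩ := ih a ((c.toNat : Int))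
      refine ⟨?_, ?_, by omega, by omega, fun d hd => ?_⟩
      · rcases q1 with h | ⟨d, hd, he⟩
        · exact Or.inl h
        · exact Or.inr ⟨d, by simp [hd], he⟩
      · rcases q2 with h | ⟨d, hd, he⟩
        · first
          | exact Or.inl h
          | exact Or.inr ⟨c, by simp, h⟩
        · exact Or.inr ⟨d, by simp [hd], he⟩
      · rcases List.mem_cons.mp hd with h | h
        · subst h; exact ⟨by omega, by omega⟩
        · exact q5 d h
    · simp only [if_neg h1, if_neg h2]
      obtain ⟨q1, q2, q3, q4, q5⟩ := ih a b
      refine ⟨?_, ?_, by omega, by omega, fun d hd => ?_⟩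
      · rcases q1 with h | ⟨d, hd, he⟩
        · exact Or.inl h
        · exact Or.inr ⟨d, by simp [hd], he⟩
      · rcases q2 with h | ⟨d, hd, he⟩
        · exact Or.inl h
        · exact Or.inr ⟨d, by simp [hd], he⟩
      · rcases List.mem_cons.mp hd with h | h
        · subst h; exact ⟨by omega, by omega⟩
        · exact q5 d h

theorem OdstepMniej10_spec : Claim_equal_OdstepMniej10 := by
  intro s _
  unfold Spec_OdstepMniej10
  rw [portA_eq_pairs]
  unfold OdstepMniej10_alt
  cases hs : s.toList with
  | nil => simp
  | cons c rest =>
    simp only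
    obtain ⟨q1, q2, q3, q4, q5⟩ := foldl_minmax rest (c.toNat : Int) (c.toNat : Int)
    set p := rest.foldl
      (fun (p : Int × Int) c =>
        (if (c.toNat : Int) < p.1 then (c.toNat : Int) else p.1,
         if (c.toNat : Int) > p.2 then (c.toNat : Int) else p.2)) ((c.toNat : Int), (c.toNat : Int)) with hp
    have hlo : ∀ d ∈ c :: rest, p.1 ≤ (d.toNat : Int) ∧ (d.toNat : Int) ≤ p.2 := by
      intro d hd
      rcases List.mem_cons.mp hd with h | h
      · subst h; constructor <;> omega
      · exact q5 d h
    have hattain1 : ∃ d ∈ c :: rest, p.1 = (d.toNat : Int) := by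
      rcases q1 with h | ⟨d, hd, he⟩
      · exact ⟨c, by simp, h⟩
      · exact ⟨d, by simp [hd], he⟩
    have hattain2 : ∃ d ∈ c :: rest, p.2 = (d.toNat : Int) := by
      rcases q2 with h | ⟨d, hd, he⟩
      · exact ⟨c, by simp, h⟩
      · exact ⟨d, by simp [hd], he⟩
    rw [Bool.eq_iff_iff]
    simp only [List.all_eq_true, decide_eq_true_eq, OdlLiter2]
    constructor
    · intro hall
      obtain ⟨d1, hd1, he1⟩ := hattain1
      obtain ⟨d2, hd2, he2⟩ := hattain2
      have := hall d2 hd2 d1 hd1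
      rw [abs_le] at this
      omega
    · intro hle z hz w hw
      have h1 := hlo z hz
      have h2 := hlo w hw
      rw [abs_le]
      omega
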